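-- pv_equiv track=rewrite | github.com/openalea-incubator/adel | adel/plantgen/plantgen_core.py | _gen_id_plt_list
-- ===== SOURCE A (Python) =====
-- def _gen_id_plt_list(plant_ids, id_cohort_list):
--     '''Generate the *id_plt* column.'''
--     id_plt_list = []
--     current_plant_index = 0
--     for plant_id in plant_ids:
--         start_index = current_plant_index + 1
--         if 1 in id_cohort_list[start_index:]:
--             next_plant_first_row = id_cohort_list.index(1, start_index)
--         else:
--             next_plant_first_row = len(id_cohort_list)
--         current_plant_axes = id_cohort_list[current_plant_index:next_plant_first_row]
--         id_plt_list.extend([plant_id for current_plant_axis in current_plant_axes])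
--         current_plant_index = next_plant_first_row
--     return id_plt_list
-- ===== SOURCE B (Python) =====
-- def _gen_id_plt_list(plant_ids, id_cohort_list):
--     '''Generate the *id_plt* column.'''
--     if not plant_ids or not id_cohort_list:
--         return []
--     out = [plant_ids[0]]
--     p = 0
--     for i in range(1, len(id_cohort_list)):
--         if id_cohort_list[i] == 1:
--             p += 1
--             if p == len(plant_ids):
--                 break
--         out.append(plant_ids[p])
--     return out
-- ===== Notes on version B (the rewrite author's own statement) =====
-- stated objective: faster
-- what changed: Replaced the per-plant loop that repeatedly slices the list and calls list.index (O(P*N)) by one linear pass over id_cohort_list that advances the plant pointer whenever a 1 marks a new segment.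
import Mathlib
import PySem

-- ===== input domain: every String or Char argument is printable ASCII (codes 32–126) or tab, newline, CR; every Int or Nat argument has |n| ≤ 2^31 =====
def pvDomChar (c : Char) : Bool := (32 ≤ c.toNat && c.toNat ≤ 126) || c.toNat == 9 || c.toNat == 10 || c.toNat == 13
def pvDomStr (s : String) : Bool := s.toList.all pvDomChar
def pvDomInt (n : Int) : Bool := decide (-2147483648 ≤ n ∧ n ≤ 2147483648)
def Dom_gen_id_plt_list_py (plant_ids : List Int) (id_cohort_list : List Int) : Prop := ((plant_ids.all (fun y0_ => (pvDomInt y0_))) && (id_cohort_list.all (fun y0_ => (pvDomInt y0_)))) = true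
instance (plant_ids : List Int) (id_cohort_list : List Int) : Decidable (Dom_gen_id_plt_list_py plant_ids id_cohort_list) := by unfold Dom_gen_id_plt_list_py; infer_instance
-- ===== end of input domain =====

-- B replaces A's per-plant slice-and-index scans (O(P*N)) by one linear pass tracking the
-- current plant index; equal return value on all inputs (objective: faster, asymptotic).

-- ===== PORT A =====
-- one iteration of A's for-loop; state = (id_plt_list, current_plant_index).
-- `1 in id_cohort_list[start:]` / `id_cohort_list.index(1, start)` with the nonneg start used
-- here are exactly membership in / start + idxOf on `ys.drop start`.
def stepA (ys : List Int) (st : List Int × Nat) (pid : Int) : List Int × Nat :=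
  let c := st.2
  let start := c + 1
  let next := if (1 : Int) ∈ ys.drop start then start + (ys.drop start).idxOf 1 else ys.length
  let seg := (ys.drop c).take (next - c)   -- id_cohort_list[current_plant_index:next_plant_first_row]
  (st.1 ++ seg.map (fun _ => pid), next)

def gen_id_plt_list_py (plant_ids : List Int) (id_cohort_list : List Int) : List Int :=
  (plant_ids.foldl (stepA id_cohort_list) ([], 0)).1

-- ===== PORT B =====
-- B's single for-loop over id_cohort_list[1:], with the plant pointer p; `break` = return [].
-- p is always < plant_ids.length where plant_ids[p] is read, so getD is exact.
def altLoop (plant_ids : List Int) : List Int → Nat → List Int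
  | [], _ => []
  | v :: rest, p =>
    if v = 1 then
      if p + 1 = plant_ids.length then []
      else plant_ids.getD (p + 1) 0 :: altLoop plant_ids rest (p + 1)
    else plant_ids.getD p 0 :: altLoop plant_ids rest p

def gen_id_plt_list_py_alt (plant_ids : List Int) (id_cohort_list : List Int) : List Int :=
  match plant_ids, id_cohort_list with
  | [], _ => []
  | _, [] => []
  | p0 :: ps, _ :: rest => p0 :: altLoop (p0 :: ps) rest 0

-- ===== PRECONDITION & SPEC =====
def Spec_gen_id_plt_list_py (plant_ids : List Int) (id_cohort_list : List Int) (out : List Int) : Prop := out = gen_id_plt_list_py_alt plant_ids id_cohort_list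
instance (plant_ids : List Int) (id_cohort_list : List Int) (out : List Int) : Decidable (Spec_gen_id_plt_list_py plant_ids id_cohort_list out) := by unfold Spec_gen_id_plt_list_py; infer_instance

-- ===== CLAIM (what is proved, stated in full; the proofs are below) =====
def Claim_equal_gen_id_plt_list_py : Prop := ∀ (plant_ids : List Int) (id_cohort_list : List Int), Dom_gen_id_plt_list_py plant_ids id_cohort_list → Spec_gen_id_plt_list_py plant_ids id_cohort_list (gen_id_plt_list_py plant_ids id_cohort_list)

-- ===== LEMMAS AND PROOFS =====

-- common functional description: segments of id_cohort_list are delimited by the 1s at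
-- positions ≥ 1; the k-th plant id labels the k-th segment; zip-like truncation both ways.
def specF : List Int → List Int → List Int
  | [], _ => []
  | _ :: _, [] => []
  | pid :: rest, _ :: t =>
      pid :: ((t.takeWhile (fun v => v != 1)).map (fun _ => pid)
              ++ specF rest (t.dropWhile (fun v => v != 1)))

lemma specF_nil_right (pids : List Int) : specF pids [] = [] := by
  cases pids <;> simp [specF]

lemma take_idxOf_eq (t : List Int) (h : (1:Int) ∈ t) :
    t.take (t.idxOf 1) = t.takeWhile (fun v => v != 1) := by
  induction t with
  | nil => simp
  | cons a r ih =>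
    by_cases ha : a = 1
    · simp [ha, List.idxOf_cons, List.takeWhile_cons]
    · have hr : (1:Int) ∈ r := by cases h with
        | head => exact absurd rfl ha
        | tail _ h => exact h
      have hb : (a == (1:Int)) = false := beq_eq_false_iff_ne.mpr ha
      simp [List.idxOf_cons, List.takeWhile_cons, hb, ha, ih hr]

lemma drop_idxOf_eq (t : List Int) (h : (1:Int) ∈ t) :
    t.drop (t.idxOf 1) = t.dropWhile (fun v => v != 1) := by
  induction t with
  | nil => simp
  | cons a r ih =>
    by_cases ha : a = 1
    · simp [ha, List.idxOf_cons, List.dropWhile_cons]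
    · have hr : (1:Int) ∈ r := by cases h with
        | head => exact absurd rfl ha
        | tail _ h => exact h
      have hb : (a == (1:Int)) = false := beq_eq_false_iff_ne.mpr ha
      simp [List.idxOf_cons, List.dropWhile_cons, hb, ha, ih hr]

lemma takeWhile_of_not_mem (t : List Int) (h : (1:Int) ∉ t) :
    t.takeWhile (fun v => v != 1) = t := by
  induction t with
  | nil => rfl
  | cons a r ih =>
    have hne : a ≠ 1 := fun e => h (e ▸ List.mem_cons_self)
    have ha : (a == (1:Int)) = false := beq_eq_false_iff_ne.mpr hne
    simp [List.takeWhile_cons, ha, hne, ih (fun hm => h (List.mem_cons_of_mem _ hm))]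

lemma dropWhile_of_not_mem (t : List Int) (h : (1:Int) ∉ t) :
    t.dropWhile (fun v => v != 1) = [] := by
  induction t with
  | nil => rfl
  | cons a r ih =>
    have hne : a ≠ 1 := fun e => h (e ▸ List.mem_cons_self)
    have ha : (a == (1:Int)) = false := beq_eq_false_iff_ne.mpr hne
    simp [List.dropWhile_cons, ha, hne, ih (fun hm => h (List.mem_cons_of_mem _ hm))]

lemma foldA_acc (ys : List Int) (pids : List Int) (acc : List Int) (c : Nat) :
    (pids.foldl (stepA ys) (acc, c)).1 = acc ++ (pids.foldl (stepA ys) ([], c)).1 := by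
  induction pids generalizing acc c with
  | nil => simp
  | cons a l ih =>
    simp only [List.foldl_cons, stepA]
    rw [ih, ih (acc := [] ++ _)]
    simp

lemma stepA_shift (ys : List Int) (c : Nat) (hc : c ≤ ys.length) (pid : Int) :
    (stepA ys ([], c) pid).1 = (stepA (ys.drop c) ([], 0) pid).1
      ∧ (stepA ys ([], c) pid).2 = c + (stepA (ys.drop c) ([], 0) pid).2
      ∧ (stepA ys ([], c) pid).2 ≤ ys.length := by
  have hdd : ys.drop (c + 1) = (ys.drop c).drop 1 := by rw [List.drop_drop]
  by_cases hm : (1:Int) ∈ (ys.drop c).drop 1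
  · have hlt : ((ys.drop c).drop 1).idxOf 1 < ((ys.drop c).drop 1).length :=
      List.idxOf_lt_length_of_mem hm
    have hlen : ((ys.drop c).drop 1).length = ys.length - (c+1) := by
      rw [← hdd, List.length_drop]
    refine ⟨?_, ?_, ?_⟩ <;>
      simp only [stepA, hdd, hm, if_pos, List.drop_zero, Nat.zero_add]
    · rw [show c + 1 + ((ys.drop c).drop 1).idxOf 1 - c
        = 1 + ((ys.drop c).drop 1).idxOf 1 from by omega, Nat.sub_zero]
    · omega
    · omega
  · have hlen : (ys.drop c).length = ys.length - c := List.length_drop ..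
    refine ⟨?_, ?_, ?_⟩ <;>
      simp only [stepA, hdd, hm, if_neg, not_false_iff, List.drop_zero, Nat.zero_add, hlen]
    · rfl
    · omega
    · omega

lemma foldA_shift (pids : List Int) : ∀ (ys : List Int) (c : Nat), c ≤ ys.length →
    (pids.foldl (stepA ys) ([], c)).1 = (pids.foldl (stepA (ys.drop c)) ([], 0)).1 := by
  induction pids with
  | nil => intro ys c _; simp
  | cons a l ih =>
    intro ys c hc
    obtain ⟨h1, h2, h3⟩ := stepA_shift ys c hc a
    have h4 : (stepA (ys.drop c) ([], 0) a).2 ≤ (ys.drop c).length := by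
      rw [List.length_drop]; omega
    have L1 : (List.foldl (stepA ys) (stepA ys ([], c) a) l).1
        = (stepA ys ([], c) a).1
          ++ (List.foldl (stepA ys) ([], (stepA ys ([], c) a).2) l).1 := by
      conv_lhs => rw [show stepA ys ([], c) a
        = ((stepA ys ([], c) a).1, (stepA ys ([], c) a).2) from rfl]
      rw [foldA_acc]
    have R1 : (List.foldl (stepA (ys.drop c)) (stepA (ys.drop c) ([], 0) a) l).1
        = (stepA (ys.drop c) ([], 0) a).1
          ++ (List.foldl (stepA (ys.drop c)) ([], (stepA (ys.drop c) ([], 0) a).2) l).1 := by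
      conv_lhs => rw [show stepA (ys.drop c) ([], 0) a
        = ((stepA (ys.drop c) ([], 0) a).1, (stepA (ys.drop c) ([], 0) a).2) from rfl]
      rw [foldA_acc]
    simp only [List.foldl_cons]
    rw [L1, R1, h1, ih ys _ h3, ih (ys.drop c) _ h4, List.drop_drop,
      show (stepA ys ([], c) a).2 = (stepA (ys.drop c) ([], 0) a).2 + c from by omega,
      Nat.add_comm ((stepA (ys.drop c) ([], 0) a).2) c]

lemma A_eq_spec (pids : List Int) : ∀ ys, gen_id_plt_list_py pids ys = specF pids ys := by
  induction pids with
  | nil => intro ys; simp [gen_id_plt_list_py, specF]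
  | cons pid rest ih =>
    intro ys
    cases ys with
    | nil =>
      have h0 : stepA [] ([], 0) pid = ([], 0) := by simp [stepA]
      simp only [gen_id_plt_list_py, List.foldl_cons, h0]
      have := ih []
      simp only [gen_id_plt_list_py] at this
      rw [this, specF_nil_right, specF_nil_right]
    | cons y t =>
      have hdrop1 : (y :: t).drop 1 = t := rfl
      by_cases hm : (1:Int) ∈ t
      · have hidx : t.idxOf 1 < t.length := List.idxOf_lt_length_of_mem hm
        have hstep : stepA (y :: t) ([], 0) pid
            = (pid :: (t.take (t.idxOf 1)).map (fun _ => pid), 1 + t.idxOf 1) := by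
          simp only [stepA, hdrop1, hm, if_pos, Nat.sub_zero, List.drop_zero,
            List.nil_append]
          rw [Nat.add_comm 1 (t.idxOf 1), List.take_succ_cons]
          simp [Nat.add_comm]
        have hnext : 1 + t.idxOf 1 ≤ (y :: t).length := by simp; omega
        have hdropnext : (y :: t).drop (1 + t.idxOf 1) = t.drop (t.idxOf 1) := by
          rw [Nat.add_comm, List.drop_succ_cons]
        simp only [gen_id_plt_list_py, List.foldl_cons, hstep]
        rw [foldA_acc, foldA_shift rest _ _ hnext, hdropnext]
        have := ih (t.drop (t.idxOf 1))
        simp only [gen_id_plt_list_py] at this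
        rw [this, take_idxOf_eq t hm, drop_idxOf_eq t hm]
        simp [specF]
      · have hstep : stepA (y :: t) ([], 0) pid
            = (pid :: t.map (fun _ => pid), (y :: t).length) := by
          simp only [stepA, hdrop1, hm, if_neg, not_false_iff]
          simp
        simp only [gen_id_plt_list_py, List.foldl_cons, hstep]
        rw [foldA_acc, foldA_shift rest _ _ (le_refl _), List.drop_length]
        have := ih []
        simp only [gen_id_plt_list_py] at this
        rw [this, specF_nil_right]
        simp [specF, takeWhile_of_not_mem t hm, dropWhile_of_not_mem t hm, specF_nil_right]

lemma altLoop_seg (pids : List Int) : ∀ (t : List Int) (p : Nat),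
    altLoop pids t p = (t.takeWhile (fun v => v != 1)).map (fun _ => pids.getD p 0)
      ++ altLoop pids (t.dropWhile (fun v => v != 1)) p := by
  intro t
  induction t with
  | nil => intro p; simp [altLoop]
  | cons v rest ih =>
    intro p
    by_cases hv : v = 1
    · simp [altLoop, hv, List.takeWhile, List.dropWhile]
    · have hb : (v == (1:Int)) = false := beq_eq_false_iff_ne.mpr hv
      simp [altLoop, hv, List.takeWhile_cons, List.dropWhile_cons, hb, ih p]

lemma dropWhile_head_false {α : Type} (p : α → Bool) :
    ∀ (l : List α) (a : α) (l' : List α), l.dropWhile p = a :: l' → p a = false := by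
  intro l
  induction l with
  | nil => intro a l' h; cases h
  | cons x xs ih =>
    intro a l' h
    by_cases hx : p x
    · rw [List.dropWhile_cons_of_pos hx] at h
      exact ih _ _ h
    · rw [List.dropWhile_cons_of_neg hx] at h
      cases h
      simpa using hx

lemma altLoop_spec (pids : List Int) : ∀ (n : Nat) (t : List Int) (p : Nat),
    t.length ≤ n → p < pids.length →
    pids.getD p 0 :: altLoop pids t p = specF (pids.drop p) ((0:Int) :: t) := by
  intro n
  induction n with
  | zero =>
    intro t p ht hp
    have : t = [] := List.length_eq_zero_iff.mp (Nat.le_zero.mp ht)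
    subst this
    rw [List.drop_eq_getElem_cons hp]
    simp [altLoop, specF, List.getD_eq_getElem?_getD, specF_nil_right,
      List.getElem?_eq_getElem hp]
  | succ m ih =>
    intro t p ht hp
    rw [altLoop_seg]
    rw [List.drop_eq_getElem_cons hp]
    simp only [specF]
    have hg : pids.getD p 0 = pids[p] := by
      simp [List.getD_eq_getElem?_getD, List.getElem?_eq_getElem hp]
    rw [hg]
    congr 1
    congr 1
    -- altLoop pids (dropWhile t) p = specF (pids.drop (p+1)) (dropWhile t)
    rcases hd : t.dropWhile (fun v => v != 1) with _ | ⟨v, t'⟩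
    · simp [altLoop, specF_nil_right]
    · have hv : v = 1 := by
        have := dropWhile_head_false (fun v : Int => v != 1) t v t' hd
        simpa using this
      subst hv
      have hlen : t'.length ≤ m := by
        have h1 : (t.dropWhile (fun v => v != 1)).length ≤ t.length :=
          List.length_dropWhile_le ..
        rw [hd] at h1
        simp at h1
        omega
      by_cases hend : p + 1 = pids.length
      · have : pids.drop (p+1) = [] := List.drop_eq_nil_of_le (by omega)
        simp [altLoop, hend, this, specF]
      · have hp1 : p + 1 < pids.length := by omega
        simp only [altLoop, hend, if_neg, not_false_iff, if_pos]
        rw [ih t' (p+1) hlen hp1]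
        rw [List.drop_eq_getElem_cons hp1]
        simp [specF]

lemma B_eq_spec (pids ys : List Int) :
    gen_id_plt_list_py_alt pids ys = specF pids ys := by
  cases pids with
  | nil => simp [gen_id_plt_list_py_alt, specF]
  | cons p0 ps =>
    cases ys with
    | nil => simp [gen_id_plt_list_py_alt, specF]
    | cons y t =>
      have h0 : (0:Nat) < (p0 :: ps).length := by simp
      have := altLoop_spec (p0 :: ps) t.length t 0 (le_refl _) h0
      simp only [List.drop_zero] at this
      have hg : (p0 :: ps).getD 0 0 = p0 := rfl
      rw [hg] at this
      simp only [gen_id_plt_list_py_alt]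
      rw [this]
      simp [specF]

-- ===== VERDICT (by name: the statement is the Claim_ definition above) =====
theorem gen_id_plt_list_py_spec : Claim_equal_gen_id_plt_list_py := by
  intro pids ys _
  unfold Spec_gen_id_plt_list_py
  rw [A_eq_spec, B_eq_spec]
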